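-- pv_equiv track=rewrite | github.com/codelrond78/icarus-server | update_workspace.py | get_workspaces_needed_to_be_updated
-- ===== SOURCE A (Python) =====
-- def get_workspaces_needed_to_be_updated(all_workspaces, containers_updated):
--     workspaces = []
--     for workspace in all_workspaces:
--         for c in containers_updated:
--             if workspace_contains_container(workspace, c):
--                 workspaces.append(workspace)
--                 break
--     return workspaces
--
-- def workspace_contains_container(workspace, container):
--     return container.startswith(workspace)
-- ===== SOURCE B (Python) =====
-- def get_workspaces_needed_to_be_updated(all_workspaces, containers_updated):
--     # index every prefix of every container once; then each workspace is a
--     # single set lookup instead of a scan over all containers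
--     prefixes = set()
--     for c in containers_updated:
--         for i in range(len(c) + 1):
--             prefixes.add(c[:i])
--     return [w for w in all_workspaces if w in prefixes]
-- ===== Notes on version B (the rewrite author's own statement) =====
-- stated objective: faster
-- what changed: Instead of scanning all containers for every workspace, B builds a hash set of all prefixes of all containers once and answers each workspace with one set-membership lookup.
import Mathlib
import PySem

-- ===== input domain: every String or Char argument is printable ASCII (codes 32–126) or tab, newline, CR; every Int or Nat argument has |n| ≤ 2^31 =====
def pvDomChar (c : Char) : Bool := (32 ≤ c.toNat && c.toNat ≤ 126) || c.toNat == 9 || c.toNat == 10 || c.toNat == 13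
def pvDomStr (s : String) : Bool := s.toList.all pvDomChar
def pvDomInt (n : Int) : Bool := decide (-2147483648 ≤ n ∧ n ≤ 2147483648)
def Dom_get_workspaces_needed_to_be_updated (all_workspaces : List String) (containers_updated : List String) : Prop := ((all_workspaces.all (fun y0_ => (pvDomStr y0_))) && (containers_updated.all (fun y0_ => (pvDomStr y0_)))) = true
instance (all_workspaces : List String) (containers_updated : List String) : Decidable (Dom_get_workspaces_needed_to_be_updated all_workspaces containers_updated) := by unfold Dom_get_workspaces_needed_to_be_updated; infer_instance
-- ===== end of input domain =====

-- B replaces A's per-workspace scan over all containers by a set of all container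
-- prefixes built once, so each workspace is a single membership lookup (faster).

-- ===== PORT A =====
-- inner 'for c in containers_updated: if …: append; break' loop of A
def pvHitA (workspace : String) : List String → Bool
  | [] => false
  | c :: rest =>
      if PySem.Str.startswith c workspace then true else pvHitA workspace rest

def get_workspaces_needed_to_be_updated (all_workspaces : List String) (containers_updated : List String) : List String :=
  all_workspaces.foldl
    (fun workspaces workspace =>
      if pvHitA workspace containers_updated then workspaces ++ [workspace] else workspaces)
    []

-- ===== PORT B =====
-- Source B: prefixes = set(); for c in …: for i in range(len(c)+1): prefixes.add(c[:i])
def pvPrefixSet (containers_updated : List String) : PySem.Set String :=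
  containers_updated.foldl
    (fun s c =>
      (PySem.List.pyRange 0 (PySem.Str.len c + 1) 1).foldl
        (fun s i => PySem.Set.add s (PySem.Str.slice c none (some i))) s)
    PySem.Set.empty

def get_workspaces_needed_to_be_updated_alt (all_workspaces : List String) (containers_updated : List String) : List String :=
  let prefixes := pvPrefixSet containers_updated
  all_workspaces.filter (fun w => PySem.Set.contains prefixes w)

-- ===== PRECONDITION & SPEC =====
def Spec_get_workspaces_needed_to_be_updated (all_workspaces : List String) (containers_updated : List String) (out : List String) : Prop := out = get_workspaces_needed_to_be_updated_alt all_workspaces containers_updated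
instance (all_workspaces : List String) (containers_updated : List String) (out : List String) : Decidable (Spec_get_workspaces_needed_to_be_updated all_workspaces containers_updated out) := by unfold Spec_get_workspaces_needed_to_be_updated; infer_instance

-- ===== CLAIM (what is proved, stated in full; the proofs are below) =====
def Claim_equal_get_workspaces_needed_to_be_updated : Prop := ∀ (all_workspaces : List String) (containers_updated : List String), Dom_get_workspaces_needed_to_be_updated all_workspaces containers_updated → Spec_get_workspaces_needed_to_be_updated all_workspaces containers_updated (get_workspaces_needed_to_be_updated all_workspaces containers_updated)

-- ===== LEMMAS AND PROOFS =====

-- A's inner loop finds a hit iff some container starts with the workspace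
theorem pvHitA_iff (w : String) (cs : List String) :
    pvHitA w cs = true ↔ ∃ c ∈ cs, PySem.Str.startswith c w = true := by
  induction cs with
  | nil => simp [pvHitA]
  | cons c rest ih =>
      simp only [pvHitA]
      by_cases h : PySem.Str.startswith c w = true
      · rw [if_pos h]
        simp only [true_iff]
        exact ⟨c, List.mem_cons_self, h⟩
      · rw [if_neg h, ih]
        constructor
        · rintro ⟨c', hc', hs⟩; exact ⟨c', List.mem_cons_of_mem _ hc', hs⟩
        · rintro ⟨c', hc', hs⟩
          rcases List.mem_cons.mp hc' with rfl | hc'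
          · exact absurd hs h
          · exact ⟨c', hc', hs⟩

-- membership after folding Set.add over a list of generated elements
theorem mem_foldl_add {α : Type} (l : List α) (f : α → String) (s : PySem.Set String) (w : String) :
    (w ∈ l.foldl (fun s x => PySem.Set.add s (f x)) s) ↔ w ∈ s ∨ ∃ x ∈ l, w = f x := by
  induction l generalizing s with
  | nil => simp
  | cons x xs ih =>
      simp only [List.foldl_cons, ih, PySem.Set.mem_add, List.mem_cons]
      constructor
      · rintro (⟨hs | he⟩ | ⟨y, hy, hw⟩)
        · exact Or.inl hs
        · exact Or.inr ⟨x, Or.inl rfl, he⟩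
        · exact Or.inr ⟨y, Or.inr hy, hw⟩
      · rintro (hs | ⟨y, (rfl | hy), hw⟩)
        · exact Or.inl (Or.inl hs)
        · exact Or.inl (Or.inr hw)
        · exact Or.inr ⟨y, hy, hw⟩

-- membership in the prefix set: some slice c[:i] of some container equals w
theorem mem_pvPrefixSet (cs : List String) (w : String) :
    w ∈ pvPrefixSet cs ↔
      ∃ c ∈ cs, ∃ i ∈ PySem.List.pyRange 0 (PySem.Str.len c + 1) 1,
        w = PySem.Str.slice c none (some i) := by
  unfold pvPrefixSet
  suffices h : ∀ (s : PySem.Set String),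
      (w ∈ cs.foldl (fun s c =>
          (PySem.List.pyRange 0 (PySem.Str.len c + 1) 1).foldl
            (fun s i => PySem.Set.add s (PySem.Str.slice c none (some i))) s) s) ↔
        w ∈ s ∨ ∃ c ∈ cs, ∃ i ∈ PySem.List.pyRange 0 (PySem.Str.len c + 1) 1,
          w = PySem.Str.slice c none (some i) by
    simpa [PySem.Set.empty] using h PySem.Set.empty
  induction cs with
  | nil => simp
  | cons c rest ih =>
      intro s
      simp only [List.foldl_cons, ih, mem_foldl_add, List.mem_cons]
      constructor
      · rintro (⟨hs | ⟨i, hi, hw⟩⟩ | ⟨c', hc', hrest⟩)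
        · exact Or.inl hs
        · exact Or.inr ⟨c, Or.inl rfl, i, hi, hw⟩
        · exact Or.inr ⟨c', Or.inr hc', hrest⟩
      · rintro (hs | ⟨c', (rfl | hc'), hrest⟩)
        · exact Or.inl (Or.inl hs)
        · exact Or.inl (Or.inr hrest)
        · exact Or.inr ⟨c', hc', hrest⟩

-- a workspace equals some prefix-slice of c iff c starts with it
theorem slice_exists_iff_startswith (c w : String) :
    (∃ i ∈ PySem.List.pyRange 0 (PySem.Str.len c + 1) 1,
        w = PySem.Str.slice c none (some i)) ↔ PySem.Str.startswith c w = true := by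
  rw [PySem.Str.startswith_eq, PySem.Chars.startswith_iff]
  constructor
  · rintro ⟨i, hi, rfl⟩
    rw [PySem.List.mem_pyRange_one] at hi
    have h0 : (0:Int) ≤ i := hi.1
    have : (PySem.Str.slice c none (some i)).toList = c.toList.take i.toNat := by
      rw [PySem.Str.toList_slice, PySem.Chars.slice_eq_listSlice,
        PySem.List.slice_to _ h0]
    rw [this]
    exact List.take_prefix _ _
  · intro hp
    refine ⟨(w.toList.length : Int), ?_, ?_⟩
    · rw [PySem.List.mem_pyRange_one]
      have hle := List.IsPrefix.length_le hp
      constructor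
      · positivity
      · simp only [PySem.Str.len]
        omega
    · apply String.toList_inj.mp
      rw [PySem.Str.toList_slice, PySem.Chars.slice_eq_listSlice,
        PySem.List.slice_to _ (by positivity)]
      simpa using List.prefix_iff_eq_take.mp hp
  
-- B's membership test agrees with A's inner scan
theorem contains_eq_hit (cs : List String) (w : String) :
    PySem.Set.contains (pvPrefixSet cs) w = pvHitA w cs := by
  rcases h : pvHitA w cs with _ | _
  · rw [Bool.eq_false_iff]
    intro hc
    rw [PySem.Set.contains_iff, mem_pvPrefixSet] at hc
    obtain ⟨c, hmem, hsl⟩ := hc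
    have : ∃ c ∈ cs, PySem.Str.startswith c w = true :=
      ⟨c, hmem, (slice_exists_iff_startswith c w).mp hsl⟩
    rw [← pvHitA_iff w cs] at this
    simp [h] at this
  · rw [PySem.Set.contains_iff, mem_pvPrefixSet]
    obtain ⟨c, hmem, hsw⟩ := (pvHitA_iff w cs).mp h
    exact ⟨c, hmem, (slice_exists_iff_startswith c w).mpr hsw⟩

-- ===== VERDICT (by name: the statement is the Claim_ definition above) =====
theorem get_workspaces_needed_to_be_updated_spec : Claim_equal_get_workspaces_needed_to_be_updated := by
  intro ws cs _
  unfold Spec_get_workspaces_needed_to_be_updated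
  unfold get_workspaces_needed_to_be_updated get_workspaces_needed_to_be_updated_alt
  rw [PySem.List.foldl_append_if]
  simp only [List.nil_append, List.map_id']
  apply List.filter_congr
  intro w _
  exact (contains_eq_hit cs w).symm
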